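-- pv_equiv track=rewrite | github.com/hydropython/brownfield-cartographer | src/agents/archivist.py | _generate_architecture_overview
-- ===== SOURCE A (Python) =====
-- from typing import Dict, List, Any, Optional
--
-- def _generate_architecture_overview(surveyor: Dict) -> str:
--     """Generate a 1-paragraph architecture overview."""
--     modules = surveyor.get("modules", [])
--     edges = surveyor.get("edges", [])
--
--     if not modules:
--         return "Architecture analysis pending. Run Surveyor agent first."
--
--     module_count = len(modules)
--     edge_count = len(edges) if isinstance(edges, list) else edges
--
--     # Determine project type
--     yaml_count = sum(1 for m in modules if m.get("file_path", "").endswith((".yml", ".yaml")))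
--     sql_count = sum(1 for m in modules if m.get("file_path", "").endswith(".sql"))
--     py_count = sum(1 for m in modules if m.get("file_path", "").endswith(".py"))
--
--     if yaml_count > sql_count:
--         proj_type = "DBT project"
--     elif py_count > 0:
--         proj_type = "Python project"
--     else:
--         proj_type = "Mixed codebase"
--
--     return (
--         f"This is a **{proj_type}** with **{module_count} modules** and "
--         f"**{edge_count} dependencies**. "
--         f"The codebase follows a {'layered' if edge_count > module_count else 'flat'} "
--         f"architecture with {'high' if edge_count > module_count * 2 else 'moderate'} "
--         f"interconnectivity between components."
--     )
-- ===== SOURCE B (Python) =====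
-- def _classify(file_path):
--     """Bucket a file path into one extension category (the four suffixes are mutually exclusive)."""
--     if file_path.endswith((".yml", ".yaml")):
--         return "yaml"
--     if file_path.endswith(".sql"):
--         return "sql"
--     if file_path.endswith(".py"):
--         return "py"
--     return "other"
--
--
-- def _generate_architecture_overview(surveyor):
--     """Generate a 1-paragraph architecture overview via an extension-category histogram."""
--     modules = surveyor.get("modules", [])
--     edges = surveyor.get("edges", [])
--
--     if not modules:
--         return "Architecture analysis pending. Run Surveyor agent first."
--
--     module_count = len(modules)
--     edge_count = len(edges) if isinstance(edges, list) else edges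
--
--     # One histogram of module categories instead of three suffix-counting scans
--     tally = {}
--     for m in modules:
--         cat = _classify(m.get("file_path", ""))
--         tally[cat] = tally.get(cat, 0) + 1
--
--     if tally.get("yaml", 0) > tally.get("sql", 0):
--         proj_type = "DBT project"
--     elif tally.get("py", 0) > 0:
--         proj_type = "Python project"
--     else:
--         proj_type = "Mixed codebase"
--
--     return (
--         f"This is a **{proj_type}** with **{module_count} modules** and "
--         f"**{edge_count} dependencies**. "
--         f"The codebase follows a {'layered' if edge_count > module_count else 'flat'} "
--         f"architecture with {'high' if edge_count > module_count * 2 else 'moderate'} "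
--         f"interconnectivity between components."
--     )
-- ===== Notes on version B (the rewrite author's own statement) =====
-- stated objective: alternative
-- what changed: Instead of A's three independent suffix-counting sum(...) scans, B classifies each module once into a single extension category (priority chain, valid because the four suffixes are mutually exclusive) and builds one dict histogram of categories, then reads the three counts from the histogram.
import Mathlib
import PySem

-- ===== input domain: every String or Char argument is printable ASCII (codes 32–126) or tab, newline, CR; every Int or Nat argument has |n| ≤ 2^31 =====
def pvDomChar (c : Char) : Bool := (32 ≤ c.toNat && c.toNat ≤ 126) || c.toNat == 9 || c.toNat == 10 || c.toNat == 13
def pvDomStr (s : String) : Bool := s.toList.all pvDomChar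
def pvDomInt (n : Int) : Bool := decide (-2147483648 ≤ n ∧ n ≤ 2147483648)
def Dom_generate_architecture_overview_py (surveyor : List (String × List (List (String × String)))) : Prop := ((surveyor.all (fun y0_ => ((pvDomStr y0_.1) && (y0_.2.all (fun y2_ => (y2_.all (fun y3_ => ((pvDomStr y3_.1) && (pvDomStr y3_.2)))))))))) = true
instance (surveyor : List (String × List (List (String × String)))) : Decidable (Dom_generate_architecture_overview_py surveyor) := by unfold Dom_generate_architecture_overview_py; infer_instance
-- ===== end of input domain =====

-- B replaces A's three separate suffix-counting scans by a classifier that maps each module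
-- to one extension category and a single dict histogram of those categories (objective: alternative).

-- ===== PORT A =====
def generate_architecture_overview_py (surveyor : List (String × List (List (String × String)))) : String :=
  let modules := PySem.Dict.getD (PySem.Dict.mk surveyor) "modules" ([] : List (List (String × String)))
  let edges := PySem.Dict.getD (PySem.Dict.mk surveyor) "edges" ([] : List (List (String × String)))
  if modules.isEmpty then
    "Architecture analysis pending. Run Surveyor agent first."
  else
    let module_count : Int := modules.length
    -- edges always has list type here, so isinstance(edges, list) is True: edge_count = len(edges)
    let edge_count : Int := edges.length
    let yaml_count : Int := (modules.map (fun m =>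
      if PySem.Str.endswith (PySem.Dict.getD (PySem.Dict.mk m) "file_path" "") ".yml" ||
         PySem.Str.endswith (PySem.Dict.getD (PySem.Dict.mk m) "file_path" "") ".yaml" then (1 : Int) else 0)).sum
    let sql_count : Int := (modules.map (fun m =>
      if PySem.Str.endswith (PySem.Dict.getD (PySem.Dict.mk m) "file_path" "") ".sql" then (1 : Int) else 0)).sum
    let py_count : Int := (modules.map (fun m =>
      if PySem.Str.endswith (PySem.Dict.getD (PySem.Dict.mk m) "file_path" "") ".py" then (1 : Int) else 0)).sum
    let proj_type : String :=
      if yaml_count > sql_count then "DBT project"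
      else if py_count > 0 then "Python project"
      else "Mixed codebase"
    "This is a **" ++ proj_type ++ "** with **" ++ PySem.Int.toStr module_count ++
      " modules** and **" ++ PySem.Int.toStr edge_count ++ " dependencies**. " ++
      "The codebase follows a " ++ (if edge_count > module_count then "layered" else "flat") ++
      " architecture with " ++ (if edge_count > module_count * 2 then "high" else "moderate") ++
      " interconnectivity between components."

-- ===== PORT B =====
-- _classify: bucket a file path into one extension category (priority chain)
def pvClassify (file_path : String) : String :=
  if PySem.Str.endswith file_path ".yml" || PySem.Str.endswith file_path ".yaml" then "yaml"
  else if PySem.Str.endswith file_path ".sql" then "sql"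
  else if PySem.Str.endswith file_path ".py" then "py"
  else "other"

def generate_architecture_overview_py_alt (surveyor : List (String × List (List (String × String)))) : String :=
  let modules := PySem.Dict.getD (PySem.Dict.mk surveyor) "modules" ([] : List (List (String × String)))
  let edges := PySem.Dict.getD (PySem.Dict.mk surveyor) "edges" ([] : List (List (String × String)))
  if modules.isEmpty then
    "Architecture analysis pending. Run Surveyor agent first."
  else
    let module_count : Int := modules.length
    let edge_count : Int := edges.length
    -- tally[cat] = tally.get(cat, 0) + 1 over cat = _classify(m.get("file_path", ""))
    let tally : PySem.Dict String Int := modules.foldl (fun d m =>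
      let cat := pvClassify (PySem.Dict.getD (PySem.Dict.mk m) "file_path" "")
      d.insert cat (d.getD cat 0 + 1)) PySem.Dict.empty
    let proj_type : String :=
      if tally.getD "yaml" 0 > tally.getD "sql" 0 then "DBT project"
      else if tally.getD "py" 0 > 0 then "Python project"
      else "Mixed codebase"
    "This is a **" ++ proj_type ++ "** with **" ++ PySem.Int.toStr module_count ++
      " modules** and **" ++ PySem.Int.toStr edge_count ++ " dependencies**. " ++
      "The codebase follows a " ++ (if edge_count > module_count then "layered" else "flat") ++
      " architecture with " ++ (if edge_count > module_count * 2 then "high" else "moderate") ++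
      " interconnectivity between components."

-- ===== PRECONDITION & SPEC =====
def Spec_generate_architecture_overview_py (surveyor : List (String × List (List (String × String)))) (out : String) : Prop := out = generate_architecture_overview_py_alt surveyor
instance (surveyor : List (String × List (List (String × String)))) (out : String) : Decidable (Spec_generate_architecture_overview_py surveyor out) := by unfold Spec_generate_architecture_overview_py; infer_instance

-- ===== CLAIM (what is proved, stated in full; the proofs are below) =====
def Claim_equal_generate_architecture_overview_py : Prop := ∀ (surveyor : List (String × List (List (String × String)))), Dom_generate_architecture_overview_py surveyor → Spec_generate_architecture_overview_py surveyor (generate_architecture_overview_py surveyor)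

-- ===== LEMMAS AND PROOFS =====
-- a path cannot end in two of the suffixes at once (suffixes of one list are comparable)
lemma pv_not_both (s p q : String) (h1 : PySem.Str.endswith s p = true)
    (hpq : ¬ p.toList <:+ q.toList) (hqp : ¬ q.toList <:+ p.toList) :
    PySem.Str.endswith s q = false := by
  rw [PySem.Str.endswith_eq] at h1 ⊢
  have h1' : p.toList <:+ s.toList := (PySem.Chars.endswith_iff _ _).1 h1
  rw [← Bool.not_eq_true, PySem.Chars.endswith_iff]
  intro h2
  rcases List.suffix_or_suffix_of_suffix h1' h2 with h | h
  · exact hpq h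
  · exact hqp h

lemma pv_y_not_sql (fp : String)
    (h : (PySem.Str.endswith fp ".yml" || PySem.Str.endswith fp ".yaml") = true) :
    PySem.Str.endswith fp ".sql" = false := by
  rw [Bool.or_eq_true] at h
  rcases h with h | h
  · exact pv_not_both fp ".yml" ".sql" h (by decide) (by decide)
  · exact pv_not_both fp ".yaml" ".sql" h (by decide) (by decide)

lemma pv_y_not_py (fp : String)
    (h : (PySem.Str.endswith fp ".yml" || PySem.Str.endswith fp ".yaml") = true) :
    PySem.Str.endswith fp ".py" = false := by
  rw [Bool.or_eq_true] at h
  rcases h with h | h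
  · exact pv_not_both fp ".yml" ".py" h (by decide) (by decide)
  · exact pv_not_both fp ".yaml" ".py" h (by decide) (by decide)

lemma pv_sql_not_py (fp : String) (h : PySem.Str.endswith fp ".sql" = true) :
    PySem.Str.endswith fp ".py" = false :=
  pv_not_both fp ".sql" ".py" h (by decide) (by decide)

-- the classifier's category decides each of A's three conditions
lemma pv_cls_yaml (fp : String) :
    (pvClassify fp == "yaml") = (PySem.Str.endswith fp ".yml" || PySem.Str.endswith fp ".yaml") := by
  unfold pvClassify
  split_ifs with h1 h2 h3 <;> simp_all

lemma pv_cls_sql (fp : String) :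
    (pvClassify fp == "sql") = PySem.Str.endswith fp ".sql" := by
  unfold pvClassify
  split_ifs with h1 h2 h3
  · rw [pv_y_not_sql fp h1]; decide
  · rw [h2]; decide
  · rw [Bool.not_eq_true] at h2; rw [h2]; decide
  · rw [Bool.not_eq_true] at h2; rw [h2]; decide

lemma pv_cls_py (fp : String) :
    (pvClassify fp == "py") = PySem.Str.endswith fp ".py" := by
  unfold pvClassify
  split_ifs with h1 h2 h3
  · rw [pv_y_not_py fp h1]; decide
  · rw [pv_sql_not_py fp h2]; decide
  · rw [h3]; decide
  · rw [Bool.not_eq_true] at h3; rw [h3]; decide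

-- B's histogram lookup is a count of categories
lemma pv_tally_getD (mods : List (List (String × String))) (c : String) :
    (mods.foldl (fun d m =>
        d.insert (pvClassify (PySem.Dict.getD (PySem.Dict.mk m) "file_path" ""))
          (d.getD (pvClassify (PySem.Dict.getD (PySem.Dict.mk m) "file_path" "")) 0 + 1))
      (PySem.Dict.empty : PySem.Dict String Int)).getD c 0
    = ((mods.map (fun m => pvClassify (PySem.Dict.getD (PySem.Dict.mk m) "file_path" ""))).count c : Int) := by
  rw [show (List.foldl (fun (d : PySem.Dict String Int) m =>
        d.insert (pvClassify (PySem.Dict.getD (PySem.Dict.mk m) "file_path" ""))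
          (d.getD (pvClassify (PySem.Dict.getD (PySem.Dict.mk m) "file_path" "")) 0 + 1))
        PySem.Dict.empty mods)
      = List.foldl (fun (d : PySem.Dict String Int) c => d.insert c (d.getD c 0 + 1)) PySem.Dict.empty
          (mods.map (fun m => pvClassify (PySem.Dict.getD (PySem.Dict.mk m) "file_path" "")))
    from by rw [List.foldl_map]]
  rw [PySem.Dict.getD_foldl_insert_add_one]
  simp [PySem.Dict.empty, PySem.Dict.getD, PySem.Dict.get?]

-- each category count equals A's corresponding 0/1-sum
lemma pv_count_yaml (mods : List (List (String × String))) :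
    (((mods.map (fun m => pvClassify (PySem.Dict.getD (PySem.Dict.mk m) "file_path" ""))).count "yaml" : Nat) : Int)
    = (mods.map (fun m =>
        if PySem.Str.endswith (PySem.Dict.getD (PySem.Dict.mk m) "file_path" "") ".yml" ||
           PySem.Str.endswith (PySem.Dict.getD (PySem.Dict.mk m) "file_path" "") ".yaml" then (1 : Int) else 0)).sum := by
  rw [PySem.List.sum_map_ite_one_zero, List.count_eq_countP, List.countP_map]
  exact congrArg Nat.cast (List.countP_congr (fun m _ => by rw [Function.comp_apply, pv_cls_yaml]))

lemma pv_count_sql (mods : List (List (String × String))) :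
    (((mods.map (fun m => pvClassify (PySem.Dict.getD (PySem.Dict.mk m) "file_path" ""))).count "sql" : Nat) : Int)
    = (mods.map (fun m =>
        if PySem.Str.endswith (PySem.Dict.getD (PySem.Dict.mk m) "file_path" "") ".sql" then (1 : Int) else 0)).sum := by
  rw [PySem.List.sum_map_ite_one_zero, List.count_eq_countP, List.countP_map]
  exact congrArg Nat.cast (List.countP_congr (fun m _ => by rw [Function.comp_apply, pv_cls_sql]))

lemma pv_count_py (mods : List (List (String × String))) :
    (((mods.map (fun m => pvClassify (PySem.Dict.getD (PySem.Dict.mk m) "file_path" ""))).count "py" : Nat) : Int)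
    = (mods.map (fun m =>
        if PySem.Str.endswith (PySem.Dict.getD (PySem.Dict.mk m) "file_path" "") ".py" then (1 : Int) else 0)).sum := by
  rw [PySem.List.sum_map_ite_one_zero, List.count_eq_countP, List.countP_map]
  exact congrArg Nat.cast (List.countP_congr (fun m _ => by rw [Function.comp_apply, pv_cls_py]))

-- ===== VERDICT (by name: the statement is the Claim_ definition above) =====
theorem generate_architecture_overview_py_spec : Claim_equal_generate_architecture_overview_py := by
  intro surveyor _
  unfold Spec_generate_architecture_overview_py
  unfold generate_architecture_overview_py generate_architecture_overview_py_alt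
  simp only [pv_tally_getD, pv_count_yaml, pv_count_sql, pv_count_py]
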